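-- pv_equiv track=rewrite | github.com/sundar91/dsa | PatternMatching/cyclic-permutation.py | solve
-- ===== SOURCE A (Python) =====
-- def solve(A, B):
--     n = len(A)
--     m = len(B)
--
--     s = A + '@' + B + B[0:-1]
--
--     lps = [0] * len(s)
--
--     lps[0] = 0
--     for i in range(1, len(s)):
--         x = lps[i-1]
--         while s[x] != s[i]:
--             if x == 0:
--                 x = -1
--                 break
--             x = lps[x - 1]
--         lps[i] = x + 1
--
--     count = 0
--     for i in range(len(lps)):
--         if lps[i] == n:
--             count += 1
--
--     return count
-- ===== SOURCE B (Python) =====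
-- def solve(A, B):
--     n = len(A)
--     s = A + '@' + B + B[0:-1]
--
--     count = 0
--     k = 0
--     for i in range(len(s)):
--         # longest proper border of s[:i+1]; it is at most one longer than the previous one
--         k = min(k + 1, i)
--         while k > 0 and s[:k] != s[i + 1 - k:i + 1]:
--             k -= 1
--         if k == n:
--             count += 1
--     return count
-- ===== Notes on version B (the rewrite author's own statement) =====
-- stated objective: simpler
-- what changed: Replaces the hand-built KMP failure array and its failure-link jumps (x = lps[x-1]) by a single running border length k that is capped at previous+1 and decreased one step at a time with direct slice comparisons, so the lps array disappears entirely.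
import Mathlib
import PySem

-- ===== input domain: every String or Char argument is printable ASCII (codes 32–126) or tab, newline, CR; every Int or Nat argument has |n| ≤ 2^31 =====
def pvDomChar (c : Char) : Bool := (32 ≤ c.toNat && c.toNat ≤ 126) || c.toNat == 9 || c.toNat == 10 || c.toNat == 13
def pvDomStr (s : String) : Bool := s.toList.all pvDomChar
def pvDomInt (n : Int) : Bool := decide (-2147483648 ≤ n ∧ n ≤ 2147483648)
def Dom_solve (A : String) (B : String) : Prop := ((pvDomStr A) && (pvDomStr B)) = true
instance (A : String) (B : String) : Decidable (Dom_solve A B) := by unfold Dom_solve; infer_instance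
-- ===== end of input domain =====

-- B replaces A's KMP failure array (with its lps[x-1] failure-link jumps) over s = A+'@'+B+B[:-1]
-- by a single running border length k, capped at previous+1 and decremented by one with direct
-- slice comparisons; equal on all inputs.

-- ===== PORT A =====
-- inner 'while s[x] != s[i]: if x == 0: x = -1; break; x = lps[x-1]' — returns the final x
-- (fuel x+1 suffices since every stored lps value is ≤ its index, so x strictly decreases)
def solveWhile (s : List Char) (lps : List Nat) (i : Nat) : Nat → Nat → Int
  | x, fuel + 1 =>
    if s.getD x ' ' ≠ s.getD i ' ' then
      if x = 0 then -1
      else solveWhile s lps i (lps.getD (x - 1) 0) fuel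
    else (x : Int)
  | x, 0 => (x : Int)

-- one iteration of 'for i in range(1, len(s)): x = lps[i-1]; …while…; lps[i] = x + 1'
def solveLpsStep (s : List Char) (lps : List Nat) (i : Nat) : List Nat :=
  let x := lps.getD (i - 1) 0
  lps.set i (solveWhile s lps i x (x + 1) + 1).toNat

-- 'lps = [0]*len(s); lps[0] = 0; for i in range(1, len(s)): …'
def solveLps (s : List Char) : List Nat :=
  (List.range' 1 (s.length - 1)).foldl (solveLpsStep s) ((List.replicate s.length 0).set 0 0)

def solve (A : String) (B : String) : Int :=
  let n := A.toList.length
  let s := A.toList ++ ['@'] ++ B.toList ++ PySem.List.slice B.toList (some 0) (some (-1))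
  let lps := solveLps s
  (List.range lps.length).foldl
    (fun count i => if lps.getD i 0 = n then count + 1 else count) (0 : Int)

-- ===== PORT B =====
-- 'while k > 0 and s[:k] != s[i+1-k:i+1]: k -= 1' — returns the final k
def solveAltWhile (s : List Char) (i : Nat) : Nat → Nat
  | k + 1 =>
    if PySem.List.slice s none (some ((k + 1 : Nat) : Int)) ≠
        PySem.List.slice s (some ((i : Int) + 1 - ((k + 1 : Nat) : Int))) (some ((i : Int) + 1)) then
      solveAltWhile s i k
    else k + 1
  | 0 => 0

-- 'k = min(k + 1, i); …while…; if k == n: count += 1' over i in range(len(s)), state = (count, k)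
def solve_alt (A : String) (B : String) : Int :=
  let n := A.toList.length
  let s := A.toList ++ ['@'] ++ B.toList ++ PySem.List.slice B.toList (some 0) (some (-1))
  ((List.range s.length).foldl
    (fun (st : Int × Nat) i =>
      let k := solveAltWhile s i (min (st.2 + 1) i)
      (if k = n then st.1 + 1 else st.1, k))
    ((0 : Int), (0 : Nat))).1

-- ===== PRECONDITION & SPEC =====
def Spec_solve (A : String) (B : String) (out : Int) : Prop := out = solve_alt A B
instance (A : String) (B : String) (out : Int) : Decidable (Spec_solve A B out) := by unfold Spec_solve; infer_instance

-- ===== CLAIM (what is proved, stated in full; the proofs are below) =====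
def Claim_equal_solve : Prop := ∀ (A : String) (B : String), Dom_solve A B → Spec_solve A B (solve A B)

-- ===== LEMMAS AND PROOFS =====

-- 'bordB s i k': the prefix of s of length k is a (proper) border of the prefix of s ending at index i
def bordB (s : List Char) (i k : Nat) : Bool :=
  decide (k ≤ i) && (List.range k).all (fun j => s.getD j ' ' == s.getD (i + 1 - k + j) ' ')

-- 'mb s i': length of the longest proper border of the prefix of s ending at index i
def mb (s : List Char) (i : Nat) : Nat := Nat.findGreatest (fun k => bordB s i k = true) i

theorem bordB_iff (s : List Char) (i k : Nat) :
    bordB s i k = true ↔ k ≤ i ∧ ∀ j < k, s.getD j ' ' = s.getD (i + 1 - k + j) ' ' := by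
  simp [bordB, List.all_eq_true]

theorem bord_zero (s : List Char) (i : Nat) : bordB s i 0 = true := by
  simp [bordB]

theorem mb_le (s : List Char) (i : Nat) : mb s i ≤ i := Nat.findGreatest_le i

theorem bord_mb (s : List Char) (i : Nat) : bordB s i (mb s i) = true := by
  unfold mb
  exact Nat.findGreatest_spec (P := fun k => bordB s i k = true) (Nat.zero_le i) (bord_zero s i)

theorem le_mb (s : List Char) (i k : Nat) (h : bordB s i k = true) : k ≤ mb s i :=
  Nat.le_findGreatest ((bordB_iff s i k).1 h).1 h

theorem mb_zero (s : List Char) : mb s 0 = 0 := rfl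

theorem chain_down (s : List Char) (i a b : Nat) (ha : bordB s i a = true)
    (hb : bordB s i b = true) (hba : b < a) : bordB s (a - 1) b = true := by
  rw [bordB_iff] at ha hb ⊢
  obtain ⟨hai, ha⟩ := ha
  obtain ⟨hbi, hb⟩ := hb
  refine ⟨by omega, fun j hj => ?_⟩
  have h1 : s.getD (a - b + j) ' ' = s.getD (i + 1 - a + (a - b + j)) ' ' := ha _ (by omega)
  have e1 : i + 1 - a + (a - b + j) = i + 1 - b + j := by omega
  have e2 : a - 1 + 1 - b + j = a - b + j := by omega
  rw [e2, h1, e1, ← hb j hj]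

theorem chain_up (s : List Char) (i a b : Nat) (ha : bordB s i a = true)
    (hb : bordB s (a - 1) b = true) : bordB s i b = true := by
  rcases Nat.eq_zero_or_pos a with rfl | hapos
  · have : b = 0 := by have := ((bordB_iff _ _ _).1 hb).1; omega
    subst this; exact bord_zero s i
  rw [bordB_iff] at ha hb ⊢
  obtain ⟨hai, ha⟩ := ha
  obtain ⟨hbi, hb⟩ := hb
  refine ⟨by omega, fun j hj => ?_⟩
  have h1 : s.getD j ' ' = s.getD (a - b + j) ' ' := by
    have := hb j hj
    have e : a - 1 + 1 - b + j = a - b + j := by omega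
    rwa [e] at this
  have h2 : s.getD (a - b + j) ' ' = s.getD (i + 1 - a + (a - b + j)) ' ' := ha _ (by omega)
  have e1 : i + 1 - a + (a - b + j) = i + 1 - b + j := by omega
  rw [h1, h2, e1]

theorem bord_step (s : List Char) (i k : Nat) :
    bordB s (i + 1) (k + 1) = true ↔
      bordB s i k = true ∧ s.getD k ' ' = s.getD (i + 1) ' ' := by
  rw [bordB_iff, bordB_iff]
  constructor
  · rintro ⟨hk, h⟩
    refine ⟨⟨by omega, fun j hj => ?_⟩, ?_⟩
    · have := h j (by omega)
      have e : i + 1 + 1 - (k + 1) + j = i + 1 - k + j := by omega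
      rwa [e] at this
    · have := h k (by omega)
      have e : i + 1 + 1 - (k + 1) + k = i + 1 := by omega
      rwa [e] at this
  · rintro ⟨⟨hk, h⟩, hc⟩
    refine ⟨by omega, fun j hj => ?_⟩
    rcases Nat.lt_or_ge j k with hjk | hjk
    · have := h j hjk
      have e : i + 1 + 1 - (k + 1) + j = i + 1 - k + j := by omega
      rwa [e]
    · have hjk2 : j = k := by omega
      have e : i + 1 + 1 - (k + 1) + j = i + 1 := by omega
      rw [e, hjk2]; exact hc

theorem solveWhile_spec (s : List Char) (lps : List Nat) (i : Nat)
    (hlps : ∀ j, j ≤ i → lps.getD j 0 = mb s j) :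
    ∀ fuel x, x < fuel → x ≤ i → bordB s i x = true →
      (∀ k, bordB s i k = true → s.getD k ' ' = s.getD (i + 1) ' ' → k ≤ x) →
      (solveWhile s lps (i + 1) x fuel + 1).toNat = mb s (i + 1) := by
  intro fuel
  induction fuel with
  | zero => intro x hx; omega
  | succ fuel ih =>
    intro x hx hxi hbx hmax
    simp only [solveWhile]
    by_cases hne : s.getD x ' ' ≠ s.getD (i + 1) ' '
    · rw [if_pos hne]
      by_cases hx0 : x = 0
      · rw [if_pos hx0]
        have hmb0 : mb s (i + 1) = 0 := by
          rcases Nat.eq_zero_or_pos (mb s (i + 1)) with h0 | hpos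
          · exact h0
          · exfalso
            obtain ⟨k', hk'⟩ : ∃ k', mb s (i + 1) = k' + 1 :=
              ⟨mb s (i + 1) - 1, by omega⟩
            have hb := bord_mb s (i + 1)
            rw [hk', bord_step] at hb
            have hle := hmax k' hb.1 hb.2
            have hk0 : k' = 0 := by omega
            rw [hk0] at hb
            rw [hx0] at hne
            exact hne hb.2
        rw [hmb0]; decide
      · rw [if_neg hx0]
        have hx1i : x - 1 ≤ i := by omega
        have hlx : lps.getD (x - 1) 0 = mb s (x - 1) := hlps _ hx1i
        have hmble : mb s (x - 1) ≤ x - 1 := mb_le s (x - 1)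
        apply ih
        · omega
        · omega
        · exact chain_up s i x _ hbx (by rw [hlx]; exact bord_mb s (x - 1))
        · intro k hbk hck
          have hkx : k ≤ x := hmax k hbk hck
          have hkne : k ≠ x := by
            intro h; rw [h] at hck; exact hne hck
          have hklt : k < x := by omega
          have := chain_down s i x k hbx hbk hklt
          rw [hlx]
          exact le_mb s (x - 1) k this
    · rw [if_neg hne]
      push_neg at hne
      have h1 : x + 1 ≤ mb s (i + 1) :=
        le_mb s (i + 1) (x + 1) ((bord_step s i x).2 ⟨hbx, hne⟩)
      have h2 : mb s (i + 1) ≤ x + 1 := by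
        obtain ⟨k', hk'⟩ : ∃ k', mb s (i + 1) = k' + 1 :=
          ⟨mb s (i + 1) - 1, by omega⟩
        have hb := bord_mb s (i + 1)
        rw [hk', bord_step] at hb
        have := hmax k' hb.1 hb.2
        omega
      have : mb s (i + 1) = x + 1 := by omega
      rw [this]
      push_cast
      omega

theorem getD_set_nat (l : List Nat) (i j v : Nat) :
    (l.set i v).getD j 0 = if i = j ∧ i < l.length then v else l.getD j 0 := by
  rw [List.getD_eq_getElem?_getD, List.getD_eq_getElem?_getD, List.getElem?_set]
  by_cases h1 : i = j
  · subst h1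
    by_cases h2 : i < l.length <;> simp [h2]
  · by_cases h2 : i < l.length <;> simp [h1, h2]

theorem solveLps_aux (s : List Char) :
    ∀ t, t ≤ s.length - 1 →
      ((List.range' 1 t).foldl (solveLpsStep s)
          ((List.replicate s.length 0).set 0 0)).length = s.length ∧
      ∀ j ≤ t, ((List.range' 1 t).foldl (solveLpsStep s)
          ((List.replicate s.length 0).set 0 0)).getD j 0 = mb s j := by
  intro t
  induction t with
  | zero =>
    intro _
    refine ⟨by simp, fun j hj => ?_⟩
    have hj0 : j = 0 := by omega
    subst hj0
    simp only [List.range'_zero, List.foldl_nil]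
    rw [mb_zero, getD_set_nat]
    split_ifs <;> simp [List.getD_eq_getElem?_getD, List.getElem?_replicate]
    split_ifs <;> simp
  | succ t ih =>
    intro ht
    obtain ⟨ihlen, ihval⟩ := ih (by omega)
    have hcat : List.range' 1 (t + 1) = List.range' 1 t ++ [1 + t] := by
      rw [List.range'_concat]; simp
    rw [hcat, List.foldl_append, List.foldl_cons, List.foldl_nil]
    have hx0 : (((List.range' 1 t).foldl (solveLpsStep s)
        ((List.replicate s.length 0).set 0 0))).getD (t + 1 - 1) 0 = mb s t := by
      have : t + 1 - 1 = t := by omega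
      rw [this]; exact ihval t le_rfl
    have hsw := solveWhile_spec s _ t (fun j hj => ihval j hj) (mb s t + 1) (mb s t)
      (by omega) (mb_le s t) (bord_mb s t) (fun k hb _ => le_mb s t k hb)
    have h1t : 1 + t = t + 1 := by omega
    refine ⟨?_, fun j hj => ?_⟩
    · simp only [solveLpsStep, List.length_set]
      exact ihlen
    · simp only [solveLpsStep]
      rw [getD_set_nat]
      by_cases hjt : j = 1 + t
      · rw [if_pos ⟨hjt.symm, by rw [ihlen]; omega⟩, hjt, h1t]
        rw [hx0, hsw]
      · rw [if_neg (by tauto)]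
        exact ihval j (by omega)

theorem solveLps_spec (s : List Char) :
    (solveLps s).length = s.length ∧ ∀ j < s.length, (solveLps s).getD j 0 = mb s j := by
  obtain ⟨h1, h2⟩ := solveLps_aux s (s.length - 1) le_rfl
  exact ⟨h1, fun j hj => h2 j (by omega)⟩

-- counting helpers
theorem foldl_if_count (l : List Nat) (P : Nat → Prop) [DecidablePred P] (c : Int) :
    l.foldl (fun count i => if P i then count + 1 else count) c =
      c + (l.countP (fun i => decide (P i)) : Int) := by
  induction l generalizing c with
  | nil => simp
  | cons x xs ih =>
    by_cases h : P x <;> simp [List.countP_cons, h, ih] <;> push_cast <;> ring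

theorem getD_take (s : List Char) (k j : Nat) (hj : j < k) (hjs : j < s.length) :
    (s.take k).getD j ' ' = s.getD j ' ' := by
  rw [List.getD_eq_getElem _ _ (by simp; omega), List.getD_eq_getElem _ _ hjs]
  exact List.getElem_take

theorem getD_drop_take (s : List Char) (a k j : Nat) (hj : j < k) (hk : a + k ≤ s.length) :
    ((s.drop a).take k).getD j ' ' = s.getD (a + j) ' ' := by
  have h1 : j < ((s.drop a).take k).length := by simp; omega
  rw [List.getD_eq_getElem _ _ h1, List.getD_eq_getElem _ _ (by omega : a + j < s.length)]
  rw [show ((s.drop a).take k)[j]'h1 = (s.drop a)[j]'(by simp; omega) from List.getElem_take]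
  exact List.getElem_drop

theorem sliceCond_iff (s : List Char) (i k : Nat) (hk : k ≤ i) (hi : i < s.length) :
    (PySem.List.slice s none (some ((k : Nat) : Int)) =
      PySem.List.slice s (some ((i : Int) + 1 - ((k : Nat) : Int))) (some ((i : Int) + 1)))
      ↔ bordB s i k = true := by
  have h1 : PySem.List.slice s none (some ((k : Nat) : Int)) = s.take k :=
    PySem.List.slice_to_natCast s k
  have hc1 : (i : Int) + 1 - ((k : Nat) : Int) = ((i + 1 - k : Nat) : Int) := by push_cast; omega
  have hc2 : (i : Int) + 1 = ((i + 1 : Nat) : Int) := by push_cast; ring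
  have h2 : PySem.List.slice s (some ((i : Int) + 1 - ((k : Nat) : Int))) (some ((i : Int) + 1)) =
      (s.drop (i + 1 - k)).take k := by
    rw [hc1, hc2, PySem.List.slice_natCast]
    congr 1
    omega
  rw [h1, h2, bordB_iff]
  have hlen1 : (s.take k).length = k := by simp; omega
  have hlen2 : ((s.drop (i + 1 - k)).take k).length = k := by simp; omega
  constructor
  · intro h
    refine ⟨hk, fun j hj => ?_⟩
    have hgd := congrArg (fun l => l.getD j ' ') h
    simp only at hgd
    rwa [getD_take s k j hj (by omega), getD_drop_take s (i + 1 - k) k j hj (by omega)] at hgd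
  · rintro ⟨_, h⟩
    apply List.ext_getElem (by rw [hlen1, hlen2])
    intro j h1j h2j
    have hj : j < k := by rwa [hlen1] at h1j
    calc (s.take k)[j] = (s.take k).getD j ' ' := (List.getD_eq_getElem _ _ h1j).symm
      _ = s.getD j ' ' := getD_take s k j hj (by omega)
      _ = s.getD (i + 1 - k + j) ' ' := h j hj
      _ = ((s.drop (i + 1 - k)).take k).getD j ' ' :=
            (getD_drop_take s (i + 1 - k) k j hj (by omega)).symm
      _ = ((s.drop (i + 1 - k)).take k)[j] := List.getD_eq_getElem _ _ h2j

theorem solveAltWhile_eq (s : List Char) (i : Nat) (hi : i < s.length) :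
    ∀ c, c ≤ i → solveAltWhile s i c = Nat.findGreatest (fun k => bordB s i k = true) c := by
  intro c
  induction c with
  | zero => intro _; rfl
  | succ c ih =>
    intro hc
    rw [Nat.findGreatest_succ]
    simp only [solveAltWhile]
    by_cases hb : bordB s i (c + 1) = true
    · rw [if_neg (fun hne => hne ((sliceCond_iff s i (c + 1) hc hi).2 hb)), if_pos hb]
    · rw [if_pos (fun heq => hb ((sliceCond_iff s i (c + 1) hc hi).1 heq)), if_neg hb]
      exact ih (by omega)

theorem findGreatest_cap (s : List Char) (i cap : Nat) (h1 : mb s i ≤ cap) (h2 : cap ≤ i) :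
    Nat.findGreatest (fun k => bordB s i k = true) cap = mb s i := by
  rw [Nat.findGreatest_eq_iff]
  refine ⟨h1, fun _ => bord_mb s i, fun k hk1 hk2 => ?_⟩
  intro hP
  have := le_mb s i k hP
  omega

theorem mb_succ_le (s : List Char) (i : Nat) : mb s (i + 1) ≤ mb s i + 1 := by
  rcases Nat.eq_zero_or_pos (mb s (i + 1)) with h0 | hpos
  · omega
  · obtain ⟨k', hk'⟩ : ∃ k', mb s (i + 1) = k' + 1 := ⟨mb s (i + 1) - 1, by omega⟩
    have hb := bord_mb s (i + 1)
    rw [hk', bord_step] at hb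
    have := le_mb s i k' hb.1
    omega

theorem solveAlt_fold (s : List Char) (n : Nat) :
    ∀ m, m ≤ s.length →
      (List.range m).foldl
        (fun (st : Int × Nat) i =>
          let k := solveAltWhile s i (min (st.2 + 1) i)
          (if k = n then st.1 + 1 else st.1, k))
        ((0 : Int), (0 : Nat)) =
      (((List.range m).countP (fun i => decide (mb s i = n)) : Int), mb s (m - 1)) := by
  intro m
  induction m with
  | zero => intro _; simp [mb_zero]
  | succ m ih =>
    intro hm
    rw [List.range_succ, List.foldl_append, ih (by omega), List.foldl_cons, List.foldl_nil]
    have hmi : m < s.length := by omega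
    have hcap : solveAltWhile s m (min (mb s (m - 1) + 1) m) = mb s m := by
      rcases Nat.eq_zero_or_pos m with rfl | hpos
      · have hmin : min (mb s (0 - 1) + 1) 0 = 0 := by omega
        rw [hmin, mb_zero]
        rfl
      · have hle : mb s m ≤ min (mb s (m - 1) + 1) m := by
          have h1 := mb_succ_le s (m - 1)
          have hm1 : m - 1 + 1 = m := by omega
          rw [hm1] at h1
          have h2 := mb_le s m
          omega
        rw [solveAltWhile_eq s m hmi _ (min_le_right _ _)]
        exact findGreatest_cap s m _ hle (min_le_right _ _)
    simp only [hcap]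
    rw [List.countP_append]
    have hm1 : m + 1 - 1 = m := by omega
    rw [hm1]
    by_cases hn : mb s m = n <;> simp [hn]

-- ===== VERDICT (by name: the statement is the Claim_ definition above) =====
theorem solve_spec : Claim_equal_solve := by
  unfold Claim_equal_solve Spec_solve
  intro A B _
  simp only [solve, solve_alt]
  obtain ⟨hlen, hval⟩ := solveLps_spec
    (A.toList ++ ['@'] ++ B.toList ++ PySem.List.slice B.toList (some 0) (some (-1)))
  rw [hlen, foldl_if_count, solveAlt_fold _ _ _ le_rfl]
  have hc : (List.range (A.toList ++ ['@'] ++ B.toList ++ PySem.List.slice B.toList (some 0) (some (-1))).length).countP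
      (fun i => decide ((solveLps (A.toList ++ ['@'] ++ B.toList ++ PySem.List.slice B.toList (some 0) (some (-1)))).getD i 0 = A.toList.length)) =
    (List.range (A.toList ++ ['@'] ++ B.toList ++ PySem.List.slice B.toList (some 0) (some (-1))).length).countP
      (fun i => decide (mb (A.toList ++ ['@'] ++ B.toList ++ PySem.List.slice B.toList (some 0) (some (-1))) i = A.toList.length)) := by
    apply List.countP_congr
    intro i hi
    have h := List.mem_range.1 hi
    rw [hval i h]
  rw [hc]
  simp
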